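-- pv_equiv track=rewrite | github.com/anaplo1/Lab_9_to_11 | lab_10.py | f
-- ===== SOURCE A (Python) =====
-- def f(lst, i):
--     count = 0
--     new_str = ""
--     for j in range(len(lst[i][3])):
--         if lst[i][3][j] == "-":
--             count += 1
--         if count != 2 or (count == 2 and lst[i][3][j] != "-"):
--             new_str += lst[i][3][j]
--     return new_str
-- ===== SOURCE B (Python) =====
-- def f(lst, i):
--     s = lst[i][3]
--     p1 = s.find('-')
--     p2 = s.find('-', p1 + 1)
--     if p2 == -1:
--         return s
--     return s[:p2] + s[p2 + 1:]
-- ===== Notes on version B (the rewrite author's own statement) =====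
-- stated objective: alternative
-- what changed: B locates the second dash by two str.find calls and slices it out, instead of rebuilding the string character-by-character while counting dashes.
import Mathlib
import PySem

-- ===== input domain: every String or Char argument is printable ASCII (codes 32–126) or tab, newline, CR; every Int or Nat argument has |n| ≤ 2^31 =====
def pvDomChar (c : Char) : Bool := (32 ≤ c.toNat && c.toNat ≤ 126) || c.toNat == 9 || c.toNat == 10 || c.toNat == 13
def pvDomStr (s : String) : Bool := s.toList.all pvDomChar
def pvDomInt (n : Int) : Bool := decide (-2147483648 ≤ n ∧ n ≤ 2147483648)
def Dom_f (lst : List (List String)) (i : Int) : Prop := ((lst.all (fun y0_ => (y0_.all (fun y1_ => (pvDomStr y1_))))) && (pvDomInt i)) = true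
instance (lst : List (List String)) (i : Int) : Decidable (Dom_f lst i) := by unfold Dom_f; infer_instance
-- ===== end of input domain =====

-- B removes the second dash by two find calls and a slice instead of A's counting rebuild loop.
-- The equivalence is about the return value; neither program mutates its arguments.

-- ===== PORT A =====
-- loop body of A: count dashes, copy every char except the one where count becomes 2
def pvStep (st : Int × List Char) (c : Char) : Int × List Char :=
  let count := if c = '-' then st.1 + 1 else st.1
  if count ≠ 2 ∨ (count = 2 ∧ c ≠ '-') then (count, st.2 ++ [c]) else (count, st.2)

def f (lst : List (List String)) (i : Int) : String :=
  match PySem.List.pyGet? lst i with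
  | none => ""        -- IndexError, excluded by Pre_f
  | some row =>
    match PySem.List.pyGet? row 3 with
    | none => ""      -- IndexError, excluded by Pre_f
    | some s =>
      let cs := s.toList
      let r := (PySem.List.pyRange 0 (PySem.Str.len s) 1).foldl
        (fun st j => pvStep st (PySem.List.pyGetD cs j ' ')) (0, ([] : List Char))
      String.ofList r.2

-- ===== PORT B =====
def f_alt (lst : List (List String)) (i : Int) : String :=
  match PySem.List.pyGet? lst i with
  | none => ""        -- IndexError, excluded by Pre_f
  | some row =>
    match PySem.List.pyGet? row 3 with
    | none => ""      -- IndexError, excluded by Pre_f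
    | some s =>
      let p1 := PySem.Str.find s "-"
      let p2 := PySem.Str.findFrom s "-" (p1 + 1)
      if p2 = -1 then s
      else String.ofList (PySem.Chars.slice s.toList none (some p2) ++
                          PySem.Chars.slice s.toList (some (p2 + 1)) none)

-- ===== PRECONDITION & SPEC =====
-- Pre_f: A raises IndexError when i is out of range for lst or row i has fewer than 4 fields.
def Pre_f (lst : List (List String)) (i : Int) : Prop :=
  PySem.Raise.InRange lst.length i ∧ 4 ≤ (PySem.List.pyGetD lst i []).length
instance (lst : List (List String)) (i : Int) : Decidable (Pre_f lst i) := by unfold Pre_f; infer_instance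
def pvWitness_f : List (List String) × Int := ([["a", "b", "c", "x-y-z-w"]], 0)

def Spec_f (lst : List (List String)) (i : Int) (out : String) : Prop := out = f_alt lst i
instance (lst : List (List String)) (i : Int) (out : String) : Decidable (Spec_f lst i out) := by unfold Spec_f; infer_instance

-- ===== CLAIM (what is proved, stated in full; the proofs are below) =====
def Claim_equal_f : Prop := ∀ (lst : List (List String)) (i : Int), Dom_f lst i → Pre_f lst i → Spec_f lst i (f lst i)

-- ===== LEMMAS AND PROOFS =====

-- no dash in cs: every char is copied and count is unchanged
lemma pvLoop_nodash (cs : List Char) (k : Int) (acc : List Char)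
    (h : ∀ c ∈ cs, c ≠ '-') :
    cs.foldl pvStep (k, acc) = (k, acc ++ cs) := by
  induction cs generalizing acc with
  | nil => simp
  | cons c cs ih =>
    have hc : c ≠ '-' := h c (by simp)
    have hrest : ∀ c ∈ cs, c ≠ '-' := fun c hm => h c (by simp [hm])
    have hstep : pvStep (k, acc) c = (k, acc ++ [c]) := by
      by_cases h2 : k = 2 <;> simp [pvStep, hc, h2]
    rw [List.foldl_cons, hstep, ih _ hrest]
    simp

-- once count ≥ 2 every remaining char is copied
lemma pvLoop_ge_two (cs : List Char) (k : Int) (acc : List Char) (h : 2 ≤ k) :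
    (cs.foldl pvStep (k, acc)).2 = acc ++ cs := by
  induction cs generalizing k acc with
  | nil => simp
  | cons c cs ih =>
    by_cases hc : c = '-'
    · have : (if c = '-' then k + 1 else k) = k + 1 := by simp [hc]
      simp only [List.foldl_cons, pvStep, this]
      rw [if_pos (by left; omega)]
      rw [ih (k + 1) _ (by omega)]; simp
    · simp only [List.foldl_cons, pvStep, if_neg hc]
      rw [if_pos]
      · rw [ih k _ h]; simp
      · by_cases h2 : k = 2
        · right; exact ⟨h2, hc⟩
        · left; exact h2

-- [a] is a prefix of l iff l starts with a
lemma pvSingleton_prefix (a : Char) (l : List Char) : [a] <+: l ↔ l[0]? = some a := by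
  cases l with
  | nil => simp
  | cons b t => simp [List.cons_prefix_cons, eq_comm]

-- find cs ['-'] = -1 iff cs has no dash
lemma pvFind_neg_iff (cs : List Char) :
    PySem.Chars.find cs ['-'] = -1 ↔ ∀ c ∈ cs, c ≠ '-' := by
  rw [PySem.Chars.find_eq_neg_one_iff]
  constructor
  · intro h c hm hc
    subst hc
    obtain ⟨j, hj⟩ := List.mem_iff_getElem?.1 hm
    have hpre : ['-'] <+: cs.drop j := (pvSingleton_prefix '-' _).2 (by simpa using hj)
    exact h (hpre.isInfix.trans (List.drop_suffix j cs).isInfix)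
  · intro h hinf
    exact h '-' (hinf.subset (by simp)) rfl

-- structure of cs at the first dash
lemma pvFind_decomp (cs : List Char) (h : 0 ≤ PySem.Chars.find cs ['-']) :
    cs = cs.take (PySem.Chars.find cs ['-']).toNat ++ '-' :: cs.drop ((PySem.Chars.find cs ['-']).toNat + 1) ∧
    (∀ c ∈ cs.take (PySem.Chars.find cs ['-']).toNat, c ≠ '-') := by
  obtain ⟨hpre, hmin⟩ := PySem.Chars.find_spec h
  set n := (PySem.Chars.find cs ['-']).toNat with hn
  have hget : cs[n]? = some '-' := by
    have := (pvSingleton_prefix '-' (cs.drop n)).1 hpre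
    simpa using this
  obtain ⟨hlt, hv⟩ := List.getElem?_eq_some_iff.1 hget
  refine ⟨?_, ?_⟩
  · conv_lhs => rw [← List.take_append_drop n cs]
    congr 1
    rw [List.drop_eq_getElem_cons hlt, hv]
  · intro c hm hc
    subst hc
    obtain ⟨j, hj, hjv⟩ := List.getElem_of_mem hm
    have hjn : j < n := by
      have := hj; simp [List.length_take] at this; omega
    have hjlt : j < cs.length := by omega
    have hjc : cs[j]? = some '-' := by
      have : (cs.take n)[j] = cs[j] := List.getElem_take
      rw [this] at hjv
      simp [hjlt, hjv]
    exact hmin j hjn ((pvSingleton_prefix '-' (cs.drop j)).2 (by simpa using hjc))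

-- a found second dash has a nonnegative index
lemma pvFindFrom_nonneg (cs : List Char)
    (h : PySem.Chars.findFrom cs ['-'] (PySem.Chars.find cs ['-'] + 1) none ≠ -1) :
    0 ≤ PySem.Chars.findFrom cs ['-'] (PySem.Chars.find cs ['-'] + 1) none := by
  by_cases h1 : PySem.Chars.find cs ['-'] = -1
  · rw [h1] at h
    norm_num [PySem.Chars.findFrom_zero, h1] at h
  · have hm1 := PySem.Chars.neg_one_le_find cs ['-']
    have h0 : 0 ≤ PySem.Chars.find cs ['-'] := by omega
    obtain ⟨hpre, _⟩ := PySem.Chars.find_spec h0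
    set n := (PySem.Chars.find cs ['-']).toNat with hn
    have hget : cs[n]? = some '-' := by
      have := (pvSingleton_prefix '-' (cs.drop n)).1 hpre
      simpa using this
    have hlt : n < cs.length := (List.getElem?_eq_some_iff.1 hget).1
    have hcast : PySem.Chars.find cs ['-'] + 1 = ((n + 1 : Nat) : Int) := by push_cast; omega
    rw [hcast, PySem.Chars.findFrom_natCast cs ['-'] (n + 1) hlt] at h ⊢
    by_cases h2 : PySem.Chars.find (cs.drop (n + 1)) ['-'] = -1
    · simp [h2] at h
    · have := PySem.Chars.neg_one_le_find (cs.drop (n + 1)) ['-']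
      rw [if_neg h2]
      push_cast
      omega

-- master lemma: A's counting loop over cs equals B's find-and-slice on cs
lemma pvCore (cs : List Char) :
    (cs.foldl pvStep (0, ([] : List Char))).2 =
      (if PySem.Chars.findFrom cs ['-'] (PySem.Chars.find cs ['-'] + 1) none = -1 then cs
       else cs.take (PySem.Chars.findFrom cs ['-'] (PySem.Chars.find cs ['-'] + 1) none).toNat ++
            cs.drop ((PySem.Chars.findFrom cs ['-'] (PySem.Chars.find cs ['-'] + 1) none).toNat + 1)) := by
  by_cases h1 : PySem.Chars.find cs ['-'] = -1
  · -- no dash at all: every char is copied, find-from-0 is still -1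
    have hnod : ∀ c ∈ cs, c ≠ '-' := (pvFind_neg_iff cs).1 h1
    have hf : PySem.Chars.findFrom cs ['-'] (PySem.Chars.find cs ['-'] + 1) none = -1 := by
      rw [h1]; norm_num [PySem.Chars.findFrom_zero, h1]
    rw [hf, if_pos rfl, pvLoop_nodash cs 0 [] hnod]
    simp
  · -- there is a first dash at index n
    have h0 : 0 ≤ PySem.Chars.find cs ['-'] := by
      have := PySem.Chars.neg_one_le_find cs ['-']
      omega
    obtain ⟨hdec, hfree⟩ := pvFind_decomp cs h0
    set n := (PySem.Chars.find cs ['-']).toNat with hn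
    set t := cs.take n with ht
    set r := cs.drop (n + 1) with hr
    have hlen : n < cs.length := by
      by_contra hge
      have hLe : cs.length = t.length + (r.length + 1) := by
        conv_lhs => rw [hdec]
        simp
      have h1' : t.length = cs.length := by rw [ht, List.length_take]; omega
      have h2' : r.length = 0 := by rw [hr, List.length_drop]; omega
      omega
    have htlen : t.length = n := by simp [ht, List.length_take, Nat.min_eq_left (le_of_lt hlen)]
    have hcast : PySem.Chars.find cs ['-'] + 1 = ((n + 1 : Nat) : Int) := by
      push_cast; omega
    have hk : n + 1 ≤ cs.length := hlen
    have hff := PySem.Chars.findFrom_natCast cs ['-'] (n + 1) hk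
    by_cases h2 : PySem.Chars.find (cs.drop (n + 1)) ['-'] = -1
    · -- only one dash: everything is copied
      have hf : PySem.Chars.findFrom cs ['-'] (PySem.Chars.find cs ['-'] + 1) none = -1 := by
        rw [hcast, hff, if_pos h2]
      rw [hf, if_pos rfl]
      have hrfree : ∀ c ∈ r, c ≠ '-' := (pvFind_neg_iff r).1 h2
      conv_lhs => rw [hdec]
      rw [List.foldl_append, pvLoop_nodash t 0 [] hfree, List.foldl_cons]
      have hstep : pvStep (0, [] ++ t) '-' = (1, t ++ ['-']) := by
        simp [pvStep]
      rw [hstep, pvLoop_nodash r 1 _ hrfree]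
      conv_rhs => rw [hdec]
      simp
    · -- a second dash exists at index n+1+m: it is the one char dropped
      have hm0 : 0 ≤ PySem.Chars.find r ['-'] := by
        have := PySem.Chars.neg_one_le_find r ['-']
        rw [← hr] at h2; omega
      obtain ⟨hdec2, hfree2⟩ := pvFind_decomp r hm0
      set m := (PySem.Chars.find r ['-']).toNat with hmn
      set u := r.take m with hu
      set v := r.drop (m + 1) with hv
      have hmlen : m < r.length := by
        by_contra hge
        have hLe : r.length = u.length + (v.length + 1) := by
          conv_lhs => rw [hdec2]
          simp
        have h1' : u.length = r.length := by rw [hu, List.length_take]; omega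
        have h2' : v.length = 0 := by rw [hv, List.length_drop]; omega
        omega
      have hulen : u.length = m := by simp [hu, List.length_take, Nat.min_eq_left (le_of_lt hmlen)]
      have hf : PySem.Chars.findFrom cs ['-'] (PySem.Chars.find cs ['-'] + 1) none =
          ((n + 1 + m : Nat) : Int) := by
        rw [hcast, hff, if_neg (by rw [← hr]; exact h2)]
        rw [← hr]
        have : PySem.Chars.find r ['-'] = (m : Int) := by omega
        rw [this]
        push_cast
        ring
      rw [hf]
      have hne : ¬ ((((n + 1 + m : Nat) : Int)) = -1) := by omega
      rw [if_neg hne]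
      have htn : (((n + 1 + m : Nat) : Int)).toNat = n + 1 + m := by omega
      rw [htn]
      -- both sides as explicit appends over cs = t ++ '-' :: u ++ '-' :: v
      have hcs : cs = (t ++ '-' :: u) ++ '-' :: v := by
        conv_lhs => rw [hdec, hdec2]
        simp
      have hwlen : (t ++ '-' :: u).length = n + 1 + m := by
        rw [List.length_append, List.length_cons, htlen, hulen]
        omega
      -- right-hand side
      have hrhs : cs.take (n + 1 + m) ++ cs.drop (n + 1 + m + 1) = (t ++ '-' :: u) ++ v := by
        rw [hcs]
        rw [List.take_left' hwlen]
        congr 1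
        have hsplit : n + 1 + m + 1 = (t ++ '-' :: u).length + 1 := by omega
        rw [hsplit, List.drop_append]
        simp
      rw [hrhs]
      -- left-hand side: run the loop over the decomposition
      conv_lhs => rw [hcs]
      have hstep1 : pvStep ((0 : Int), [] ++ t) '-' = (1, t ++ ['-']) := by simp [pvStep]
      have hinner : List.foldl pvStep ((0 : Int), ([] : List Char)) (t ++ '-' :: u) =
          (1, t ++ ['-'] ++ u) := by
        rw [List.foldl_append, pvLoop_nodash t 0 [] hfree, List.foldl_cons, hstep1,
          pvLoop_nodash u 1 _ hfree2]
      have hstep2 : pvStep (1, t ++ ['-'] ++ u) '-' = (2, t ++ ['-'] ++ u) := by simp [pvStep]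
      rw [List.foldl_append, hinner, List.foldl_cons, hstep2, pvLoop_ge_two v 2 _ (by omega)]
      simp

-- ===== VERDICT (by name: the statement is the Claim_ definition above) =====
theorem f_spec : Claim_equal_f := by
  intro lst i _ hpre
  obtain ⟨hin, hlen⟩ := hpre
  unfold Spec_f f f_alt
  obtain ⟨row, hrow⟩ : ∃ row, PySem.List.pyGet? lst i = some row := by
    rcases h : PySem.List.pyGet? lst i with _ | row
    · exact absurd ((PySem.List.pyGet?_eq_none_iff lst i).mp h) (not_not_intro hin)
    · exact ⟨row, rfl⟩
  have hrowD : PySem.List.pyGetD lst i [] = row := by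
    simp [PySem.List.pyGetD, hrow]
  rw [hrowD] at hlen
  obtain ⟨s, hs⟩ : ∃ s, PySem.List.pyGet? row 3 = some s := by
    have h3 : PySem.List.pyGet? row 3 = row[(3:Nat)]? := by
      have h := PySem.List.pyGet?_natCast row 3
      norm_num at h
      exact h
    rw [h3]
    exact ⟨row[3]'(by omega), List.getElem?_eq_getElem (by omega)⟩
  simp only [hrow, hs]
  -- bridge both sides down to List Char and apply pvCore
  have hfold := PySem.List.foldl_pyRange_zero_pyGetD' s.toList ' ' pvStep ((0 : Int), ([] : List Char))
  have hlenS : PySem.Str.len s = (s.toList.length : Int) := by simp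
  rw [hlenS, hfold, pvCore]
  have hfind : PySem.Str.find s "-" = PySem.Chars.find s.toList ['-'] := by
    simpa using PySem.Str.find_eq s "-"
  have hfindFrom : PySem.Str.findFrom s "-" (PySem.Str.find s "-" + 1) =
      PySem.Chars.findFrom s.toList ['-'] (PySem.Chars.find s.toList ['-'] + 1) none := by
    rw [← hfind]
    simpa using PySem.Str.findFrom_eq s "-" (PySem.Str.find s "-" + 1) none
  rw [hfindFrom]
  set p2 := PySem.Chars.findFrom s.toList ['-'] (PySem.Chars.find s.toList ['-'] + 1) none with hp2
  by_cases h : p2 = -1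
  · rw [if_pos h, if_pos h]
    simp
  · rw [if_neg h, if_neg h]
    have hp2nn : 0 ≤ p2 := pvFindFrom_nonneg s.toList h
    congr 1
    rw [PySem.Chars.slice_eq_listSlice, PySem.Chars.slice_eq_listSlice]
    rw [PySem.List.slice_to _ hp2nn, PySem.List.slice_from _ (by omega)]
    congr 2
    omega
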